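-- pv_equiv track=rewrite | github.com/uvdsl/thesis_decision_strategy_performance | src/simulate.py | transform_decision_states_to_index
-- ===== SOURCE A (Python) =====
-- def transform_decision_states_to_index(decision_states):
--     # decision state = [ (index, a state), (index, a state), (index, b state)]
--     global_decision_indicies = dict()
--     for index in range(0,len(decision_states)):
--         current_state = tuple(decision_states[index])
--         if global_decision_indicies.get(current_state) is None:
--             global_decision_indicies.update({current_state:[]})
--         global_decision_indicies[current_state].append(index)
--     return global_decision_indicies
-- ===== SOURCE B (Python) =====
-- def transform_decision_states_to_index(decision_states):
--     # Idiomatic rewrite: dedupe the states in first-occurrence order, then build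
--     # each group's index list by a per-state scan (dict comprehension).
--     rows = [tuple(r) for r in decision_states]
--     states = list(dict.fromkeys(rows))
--     return {s: [i for i in range(len(decision_states)) if rows[i] == s] for s in states}
-- ===== Notes on version B (the rewrite author's own statement) =====
-- stated objective: idiomatic
-- what changed: A does one bucketing pass that mutates a dict of index lists; B instead dedupes the state tuples in first-occurrence order with dict.fromkeys and then builds the result as a dict comprehension whose per-state index list is a filtering scan over range(len(decision_states)).
import Mathlib
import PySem

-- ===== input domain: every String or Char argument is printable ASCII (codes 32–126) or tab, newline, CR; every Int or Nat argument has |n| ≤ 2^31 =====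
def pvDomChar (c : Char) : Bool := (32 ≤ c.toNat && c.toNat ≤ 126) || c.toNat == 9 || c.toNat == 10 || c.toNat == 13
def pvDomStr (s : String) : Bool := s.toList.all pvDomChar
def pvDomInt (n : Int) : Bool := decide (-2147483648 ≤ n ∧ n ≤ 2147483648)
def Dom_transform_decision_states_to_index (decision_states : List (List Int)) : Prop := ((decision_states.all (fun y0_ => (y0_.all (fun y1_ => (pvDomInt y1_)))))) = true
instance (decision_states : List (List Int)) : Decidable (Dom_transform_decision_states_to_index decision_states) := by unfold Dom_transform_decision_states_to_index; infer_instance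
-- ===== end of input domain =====

-- B replaces A's single mutating bucketing pass by dedupe-then-per-state-filter (idiomatic rewrite; same result, not faster).


-- ===== PORT A =====
-- loop over range(0, len(decision_states)); the in-place append d[k].append(i) (key present) is Dict.modify
def transform_decision_states_to_index (decision_states : List (List Int)) : List (List Int × List Int) :=
  ((PySem.List.pyRange 0 (PySem.List.len decision_states) 1).foldl
    (fun (d : PySem.Dict (List Int) (List Int)) index =>
      let current_state := PySem.List.pyGetD decision_states index []
      let d := if (d.get? current_state).isNone then d.insert current_state [] else d
      d.modify current_state [] (fun l => l ++ [index]))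
    PySem.Dict.empty).items

-- ===== PORT B =====
def transform_decision_states_to_index_alt (decision_states : List (List Int)) : List (List Int × List Int) :=
  let rows := decision_states.map (fun r => r)   -- tuple(r) is the identity on List Int
  let states := PySem.List.dedup rows            -- list(dict.fromkeys(rows))
  states.map (fun s =>
    (s, (PySem.List.pyRange 0 (PySem.List.len decision_states) 1).filter
          (fun i => PySem.List.pyGetD rows i [] == s)))

-- ===== PRECONDITION & SPEC =====
def Spec_transform_decision_states_to_index (decision_states : List (List Int)) (out : List (List Int × List Int)) : Prop := out = transform_decision_states_to_index_alt decision_states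
instance (decision_states : List (List Int)) (out : List (List Int × List Int)) : Decidable (Spec_transform_decision_states_to_index decision_states out) := by unfold Spec_transform_decision_states_to_index; infer_instance

-- ===== CLAIM (what is proved, stated in full; the proofs are below) =====
def Claim_equal_transform_decision_states_to_index : Prop := ∀ (decision_states : List (List Int)), Dom_transform_decision_states_to_index decision_states → Spec_transform_decision_states_to_index decision_states (transform_decision_states_to_index decision_states)

-- ===== LEMMAS AND PROOFS =====

-- A's per-index step (insert [] if the key is missing, then append in place) is exactly Dict.modify with default [].
theorem stepA_eq_modify (d : PySem.Dict (List Int) (List Int)) (k : List Int) (i : Int) :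
    (if (d.get? k).isNone then d.insert k [] else d).modify k [] (fun l => l ++ [i])
      = d.modify k [] (fun l => l ++ [i]) := by
  rcases h : d.get? k with _ | v
  · simp only [Option.isNone_none, if_true, PySem.Dict.modify,
      PySem.Dict.getD_insert_self, PySem.Dict.insert_insert_self,
      PySem.Dict.getD_of_get?_eq_none (h := h)]
  · simp

-- Core equality: the bucketing dict's items (grouped by Dict.modify) are the dedup-then-filter table.
theorem items_modify_eq_dedup_filter (ds : List (List Int)) :
    ((PySem.List.pyRange 0 (PySem.List.len ds) 1).foldl
        (fun (d : PySem.Dict (List Int) (List Int)) index =>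
          d.modify (PySem.List.pyGetD ds index []) [] (fun l => l ++ [index]))
        PySem.Dict.empty).items
      = (PySem.List.dedup ds).map (fun s =>
          (s, (PySem.List.pyRange 0 (PySem.List.len ds) 1).filter
                (fun i => PySem.List.pyGetD ds i [] == s))) := by
  rw [← List.foldl_map (f := fun i => (PySem.List.pyGetD ds i [], i))
      (g := fun (d : PySem.Dict (List Int) (List Int)) (p : List Int × Int) =>
        d.modify p.1 [] (fun l => l ++ [p.2]))]
  set l := (PySem.List.pyRange 0 (PySem.List.len ds) 1).map
      (fun i => (PySem.List.pyGetD ds i [], i)) with hl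
  have hnd : (l.foldl (fun (d : PySem.Dict (List Int) (List Int)) p =>
      d.modify p.1 [] (fun v => v ++ [p.2])) PySem.Dict.empty).keys.Nodup :=
    PySem.Dict.nodup_keys_foldl_modify_key l Prod.fst [] (fun _ p v => v ++ [p.2])
      PySem.Dict.empty (by simp [PySem.Dict.keys_empty])
  rw [PySem.Dict.items_eq_map_keys _ hnd []]
  rw [PySem.Dict.keys_foldl_modify_key l Prod.fst ([] : List Int) (fun _ p v => v ++ [p.2]) PySem.Dict.empty]
  have hkeys : PySem.Set.update (PySem.Dict.empty : PySem.Dict (List Int) (List Int)).keys (l.map Prod.fst) = PySem.List.dedup ds := by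
    rw [hl, List.map_map]
    have : ((fun p : List Int × Int => p.1) ∘ fun i => (PySem.List.pyGetD ds i [], i))
        = fun i => PySem.List.pyGetD ds i [] := rfl
    rw [this, PySem.List.map_pyGetD_pyRange_zero, PySem.List.dedup_eq_ofList]
    rfl
  rw [hkeys]
  apply List.map_congr_left
  intro k _
  congr 1
  rw [PySem.Dict.getD_foldl_modify_append l PySem.Dict.empty k, hl,
    List.filter_map, List.map_map]
  simp only [Function.comp_def, List.map_id']
  rfl

-- ===== VERDICT (by name: the statement is the Claim_ definition above) =====
theorem transform_decision_states_to_index_spec : Claim_equal_transform_decision_states_to_index := by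
  intro ds _
  unfold Spec_transform_decision_states_to_index
  unfold transform_decision_states_to_index transform_decision_states_to_index_alt
  simp only [List.map_id_fun', id, stepA_eq_modify]
  exact items_modify_eq_dedup_filter ds
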